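-- pv_equiv track=rewrite | github.com/kor0p/IoTLab3Algorithms | main.py | widthSearch
-- ===== SOURCE A (Python) =====
-- def widthSearch(init, inputs):
--     vertices = {}
--
--     for first, second in inputs:
--         if first in vertices:
--             vertices[first].add(second)
--         else:
--             vertices.update({first: {second}})
--
--     _vertices = set(vertices.keys())
--     res_vertices = set()
--     width = -1
--     iter_vertices = {init}
--
--     while iter_vertices:
--         old = iter_vertices.copy()
--         iter_vertices = set()
--         for vertex in old:
--             iter_vertices |= vertices.get(vertex, set())
--         iter_vertices -= res_vertices
--         res_vertices |= iter_vertices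
--         width += 1
--     return width
-- ===== SOURCE B (Python) =====
-- from collections import deque
--
--
-- def widthSearch(init, inputs):
--     adj = {}
--     for first, second in inputs:
--         adj.setdefault(first, set()).add(second)
--     visited = set()
--     queue = deque([(init, 0)])
--     max_dist = 0
--     while queue:
--         vertex, dist = queue.popleft()
--         for neighbor in adj.get(vertex, ()):
--             if neighbor not in visited:
--                 visited.add(neighbor)
--                 queue.append((neighbor, dist + 1))
--                 max_dist = dist + 1
--     return max_dist
-- ===== Notes on version B (the rewrite author's own statement) =====
-- stated objective: idiomatic
-- what changed: Replaces the whole-level set-algebra loop (union all neighbour sets, subtract visited, count iterations) by the standard node-at-a-time FIFO BFS with a deque carrying (vertex, distance) pairs and a running maximum distance; init is deliberately left unvisited, matching A's level counting when init is re-reachable.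
import Mathlib
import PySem

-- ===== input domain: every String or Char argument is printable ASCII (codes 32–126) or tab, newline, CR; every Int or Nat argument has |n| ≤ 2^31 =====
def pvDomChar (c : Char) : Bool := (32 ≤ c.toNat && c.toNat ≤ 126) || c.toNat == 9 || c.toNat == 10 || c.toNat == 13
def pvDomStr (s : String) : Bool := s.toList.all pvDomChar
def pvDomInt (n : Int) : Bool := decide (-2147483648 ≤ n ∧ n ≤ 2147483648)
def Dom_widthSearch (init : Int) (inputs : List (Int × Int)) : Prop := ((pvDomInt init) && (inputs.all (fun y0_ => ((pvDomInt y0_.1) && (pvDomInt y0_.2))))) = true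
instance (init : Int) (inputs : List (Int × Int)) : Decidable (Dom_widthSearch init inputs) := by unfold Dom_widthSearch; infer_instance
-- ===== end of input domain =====

-- B replaces A's whole-level set-algebra loop by the standard node-at-a-time FIFO BFS
-- (deque of (vertex, distance) pairs, running maximum distance); init is left unvisited,
-- as in A, so both count extra levels when init is re-reachable.  Objective: idiomatic.

-- ===== PORT A =====
-- building the adjacency dict: for first, second in inputs: ...
def pvBuildA (inputs : List (Int × Int)) : PySem.Dict Int (PySem.Set Int) :=
  inputs.foldl (fun d p =>
    if d.contains p.1 then d.modify p.1 PySem.Set.empty (fun s => PySem.Set.add s p.2)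
    else d.insert p.1 (PySem.Set.ofList [p.2])) PySem.Dict.empty

-- the inner 'for vertex in old: iter_vertices |= vertices.get(vertex, set())'
def pvExpandA (vertices : PySem.Dict Int (PySem.Set Int)) (old : PySem.Set Int) : PySem.Set Int :=
  old.foldl (fun acc v => PySem.Set.union acc (vertices.getD v PySem.Set.empty)) PySem.Set.empty

-- the 'while iter_vertices:' loop; fuel bounds the iteration count (inputs.length + 2 always suffices)
def pvGoA (vertices : PySem.Dict Int (PySem.Set Int)) : Nat → PySem.Set Int → PySem.Set Int → Int → Int
  | 0, _, _, width => width
  | fuel+1, iter, res, width =>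
    if iter.isEmpty then width
    else
      let next := PySem.Set.diff (pvExpandA vertices iter) res
      pvGoA vertices fuel next (PySem.Set.union res next) (width + 1)

def widthSearch (init : Int) (inputs : List (Int × Int)) : Int :=
  let vertices := pvBuildA inputs
  let _vertices := PySem.Set.ofList vertices.keys
  pvGoA vertices (inputs.length + 2) (PySem.Set.ofList [init]) PySem.Set.empty (-1)

-- ===== PORT B =====
-- adj.setdefault(first, set()).add(second)
def pvBuildB (inputs : List (Int × Int)) : PySem.Dict Int (PySem.Set Int) :=
  inputs.foldl (fun d p =>
    (d.setdefault p.1 PySem.Set.empty).modify p.1 PySem.Set.empty (fun s => PySem.Set.add s p.2))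
    PySem.Dict.empty

-- the inner 'for neighbor in adj.get(vertex, ()): if neighbor not in visited: ...'
def pvPushB (d1 : Int) : List Int → List (Int × Int) → PySem.Set Int → Int → List (Int × Int) × PySem.Set Int × Int
  | [], queue, visited, maxDist => (queue, visited, maxDist)
  | w :: ws, queue, visited, maxDist =>
    if PySem.Set.contains visited w then pvPushB d1 ws queue visited maxDist
    else pvPushB d1 ws (queue ++ [(w, d1)]) (PySem.Set.add visited w) d1

-- the 'while queue:' loop, one popleft per step; fuel bounds the pop count (inputs.length + 2 always suffices)
def pvGoB (adj : PySem.Dict Int (PySem.Set Int)) : Nat → List (Int × Int) → PySem.Set Int → Int → Int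
  | 0, _, _, maxDist => maxDist
  | _+1, [], _, maxDist => maxDist
  | fuel+1, (v, d) :: rest, visited, maxDist =>
    let st := pvPushB (d + 1) (adj.getD v PySem.Set.empty) rest visited maxDist
    pvGoB adj fuel st.1 st.2.1 st.2.2

def widthSearch_alt (init : Int) (inputs : List (Int × Int)) : Int :=
  pvGoB (pvBuildB inputs) (inputs.length + 2) [(init, 0)] PySem.Set.empty 0

-- ===== PRECONDITION & SPEC =====
def Spec_widthSearch (init : Int) (inputs : List (Int × Int)) (out : Int) : Prop := out = widthSearch_alt init inputs
instance (init : Int) (inputs : List (Int × Int)) (out : Int) : Decidable (Spec_widthSearch init inputs out) := by unfold Spec_widthSearch; infer_instance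

-- ===== CLAIM (what is proved, stated in full; the proofs are below) =====
def Claim_equal_widthSearch : Prop := ∀ (init : Int) (inputs : List (Int × Int)), Dom_widthSearch init inputs → Spec_widthSearch init inputs (widthSearch init inputs)

-- ===== LEMMAS AND PROOFS =====

lemma pvGoA_nil (adj : PySem.Dict Int (PySem.Set Int)) (f : Nat) (vis : PySem.Set Int) (w : Int) :
    pvGoA adj f [] vis w = w := by
  cases f <;> simp [pvGoA]

lemma pvGoB_nil (adj : PySem.Dict Int (PySem.Set Int)) (f : Nat) (vis : PySem.Set Int) (m : Int) :
    pvGoB adj f [] vis m = m := by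
  cases f <;> simp [pvGoB]

-- the two adjacency builds produce the same dict
lemma build_step_eq (d : PySem.Dict Int (PySem.Set Int)) (p : Int × Int) :
    (d.setdefault p.1 PySem.Set.empty).modify p.1 PySem.Set.empty (fun s => PySem.Set.add s p.2)
    = (if d.contains p.1 then d.modify p.1 PySem.Set.empty (fun s => PySem.Set.add s p.2)
       else d.insert p.1 (PySem.Set.ofList [p.2])) := by
  by_cases hc : d.contains p.1
  · simp [PySem.Dict.setdefault, hc]
  · simp only [Bool.not_eq_true] at hc
    rw [if_neg (by simp [hc])]
    have h1 : d.setdefault p.1 PySem.Set.empty = d.insert p.1 PySem.Set.empty := by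
      simp [PySem.Dict.setdefault, PySem.Dict.insert, hc]
    rw [h1, PySem.Dict.modify, PySem.Dict.getD_insert]
    simp [PySem.Dict.insert_insert_self,
      PySem.Set.ofList_eq_self_of_nodup _ (List.nodup_singleton p.2)]

lemma builds_eq (inputs : List (Int × Int)) : pvBuildB inputs = pvBuildA inputs := by
  simp only [pvBuildB, pvBuildA, build_step_eq]

lemma buildA_append (l : List (Int × Int)) (p : Int × Int) :
    pvBuildA (l ++ [p]) =
      (if (pvBuildA l).contains p.1 then (pvBuildA l).modify p.1 PySem.Set.empty (fun s => PySem.Set.add s p.2)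
       else (pvBuildA l).insert p.1 (PySem.Set.ofList [p.2])) := by
  simp [pvBuildA, List.foldl_append]

-- adjacency values are nodup
lemma build_val_nodup (inputs : List (Int × Int)) (v : Int) :
    ((pvBuildA inputs).getD v PySem.Set.empty).Nodup := by
  induction inputs using List.reverseRecOn generalizing v with
  | nil => simp [pvBuildA, PySem.Dict.getD_empty, PySem.Set.empty]
  | append_singleton l p ih =>
    rw [buildA_append]
    split
    · rw [PySem.Dict.getD_modify]
      split
      · exact PySem.Set.nodup_add _ _ (ih p.1)
      · exact ih v
    · rw [PySem.Dict.getD_insert]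
      split
      · simp [PySem.Set.ofList_eq_self_of_nodup _ (List.nodup_singleton p.2)]
      · exact ih v

-- adjacency values are among the second components of inputs
lemma build_val_mem (inputs : List (Int × Int)) (v w : Int)
    (h : w ∈ (pvBuildA inputs).getD v PySem.Set.empty) : w ∈ inputs.map (fun p => p.2) := by
  induction inputs using List.reverseRecOn generalizing v with
  | nil => simp [pvBuildA, PySem.Dict.getD_empty, PySem.Set.empty] at h
  | append_singleton l p ih =>
    rw [buildA_append] at h
    simp only [List.map_append, List.mem_append, List.map_cons, List.map_nil, List.mem_singleton]
    split at h
    · rw [PySem.Dict.getD_modify] at h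
      split at h
      · rcases (PySem.Set.mem_add _ _ _).1 h with h' | h'
        · exact Or.inl (ih _ h')
        · exact Or.inr h'
      · exact Or.inl (ih _ h)
    · rw [PySem.Dict.getD_insert] at h
      split at h
      · simp [PySem.Set.ofList_eq_self_of_nodup _ (List.nodup_singleton p.2)] at h
        exact Or.inr h
      · exact Or.inl (ih _ h)

-- pvPushB appends exactly the new (unvisited, deduplicated) neighbours
lemma pvPushB_eq (d1 : Int) (ns : List Int) (q : List (Int × Int)) (vis : PySem.Set Int) (m : Int)
    (hnd : ns.Nodup) :
    pvPushB d1 ns q vis m =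
      (q ++ (PySem.Set.diff ns vis).map (fun w => (w, d1)),
       vis ++ PySem.Set.diff ns vis,
       if PySem.Set.diff ns vis = [] then m else d1) := by
  induction ns generalizing q vis m with
  | nil => simp [pvPushB, PySem.Set.diff]
  | cons w ws ih =>
    rw [List.nodup_cons] at hnd
    by_cases hw : PySem.Set.contains vis w
    · have hw' : w ∈ vis := (PySem.Set.contains_iff _ _).1 hw
      rw [pvPushB, if_pos hw]
      have hd : PySem.Set.diff (w :: ws) vis = PySem.Set.diff ws vis := by
        simp [PySem.Set.diff, hw']
      rw [hd]; exact ih _ _ _ hnd.2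
    · have hw' : w ∉ vis := by simpa [PySem.Set.contains_iff] using hw
      rw [pvPushB, if_neg hw]
      have hadd : PySem.Set.add vis w = vis ++ [w] := PySem.Set.add_of_not_mem hw'
      have hdiff2 : PySem.Set.diff ws (vis ++ [w]) = PySem.Set.diff ws vis := by
        apply List.filter_congr
        intro x hx
        have hne : x ≠ w := fun h => hnd.1 (h ▸ hx)
        simp [PySem.Set.contains, hne]
      have hd : PySem.Set.diff (w :: ws) vis = w :: PySem.Set.diff ws vis := by
        simp [PySem.Set.diff, hw']
      rw [ih _ _ _ hnd.2, hadd, hdiff2, hd]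
      refine Prod.ext ?_ (Prod.ext ?_ ?_) <;> simp

-- proof-side description of one full level of B
def pvStepL (adj : PySem.Dict Int (PySem.Set Int)) (d1 : Int)
    (st : List (Int × Int) × PySem.Set Int × Int) (v : Int) :
    List (Int × Int) × PySem.Set Int × Int :=
  let new := PySem.Set.diff (adj.getD v PySem.Set.empty) st.2.1
  (st.1 ++ new.map (fun w => (w, d1)), st.2.1 ++ new, if new = [] then st.2.2 else d1)

-- running B through one whole level is the fold of pvStepL
lemma pvGoB_level (adj : PySem.Dict Int (PySem.Set Int)) (d : Int)
    (hvnd : ∀ v, (adj.getD v PySem.Set.empty).Nodup) :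
    ∀ (cur : List Int) (st : List (Int × Int) × PySem.Set Int × Int) (fB : Nat),
      cur.length ≤ fB →
      pvGoB adj fB (cur.map (fun v => (v, d)) ++ st.1) st.2.1 st.2.2 =
        pvGoB adj (fB - cur.length) (cur.foldl (pvStepL adj (d + 1)) st).1
          (cur.foldl (pvStepL adj (d + 1)) st).2.1 (cur.foldl (pvStepL adj (d + 1)) st).2.2 := by
  intro cur
  induction cur with
  | nil => intro st fB _; simp
  | cons v cur ih =>
    intro st fB hf
    simp only [List.length_cons] at hf
    obtain ⟨f, rfl⟩ : ∃ f, fB = f + 1 := ⟨fB - 1, by omega⟩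
    simp only [List.map_cons, List.cons_append]
    rw [pvGoB]
    rw [pvPushB_eq _ _ _ _ _ (hvnd v)]
    have hq : (cur.map (fun v => (v, d)) ++ st.1) ++
        (PySem.Set.diff (adj.getD v PySem.Set.empty) st.2.1).map (fun w => (w, d + 1)) =
        cur.map (fun v => (v, d)) ++ (pvStepL adj (d + 1) st v).1 := by
      simp [pvStepL, List.append_assoc]
    simp only [hq]
    have := ih (pvStepL adj (d + 1) st v) f (by omega)
    simp only [pvStepL] at this ⊢
    rw [this]
    simp only [List.foldl_cons]
    have hfl : f + 1 - (v :: cur).length = f - cur.length := by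
      simp only [List.length_cons]; omega
    rw [hfl]
    rfl

lemma expand_nodup (adj : PySem.Dict Int (PySem.Set Int)) (cur : List Int) :
    (pvExpandA adj cur).Nodup := by
  have aux : ∀ (cs : List Int) (s : PySem.Set Int), s.Nodup →
      (cs.foldl (fun acc v => PySem.Set.union acc (adj.getD v PySem.Set.empty)) s).Nodup := by
    intro cs
    induction cs with
    | nil => intro s hs; exact hs
    | cons v vs ih => intro s hs; exact ih _ (PySem.Set.nodup_union _ _ hs)
  exact aux cur _ List.nodup_nil

lemma expand_mem (adj : PySem.Dict Int (PySem.Set Int)) (cur : List Int) (x : Int)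
    (h : x ∈ pvExpandA adj cur) : ∃ v ∈ cur, x ∈ adj.getD v PySem.Set.empty := by
  have aux : ∀ (cs : List Int) (s : PySem.Set Int) (x : Int),
      x ∈ cs.foldl (fun acc v => PySem.Set.union acc (adj.getD v PySem.Set.empty)) s →
      x ∈ s ∨ ∃ v ∈ cs, x ∈ adj.getD v PySem.Set.empty := by
    intro cs
    induction cs with
    | nil => intro s x h; exact Or.inl h
    | cons v vs ih =>
      intro s x h
      rcases ih _ x h with h' | ⟨u, hu, hx⟩
      · rcases (PySem.Set.mem_union _ _ _).1 h' with h'' | h''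
        · exact Or.inl h''
        · exact Or.inr ⟨v, List.mem_cons_self .., h''⟩
      · exact Or.inr ⟨u, List.mem_cons_of_mem _ hu, hx⟩
  rcases aux cur _ x h with h' | h'
  · simp [PySem.Set.empty] at h'
  · exact h'

-- diff through a union splits into two consecutive diffs
lemma diff_union (s t vis : PySem.Set Int) (ht : t.Nodup) :
    PySem.Set.diff (PySem.Set.union s t) vis =
      PySem.Set.diff s vis ++ PySem.Set.diff t (vis ++ PySem.Set.diff s vis) := by
  rw [PySem.Set.union, PySem.Set.update_eq_append_filter, PySem.Set.ofList_eq_self_of_nodup _ ht]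
  rw [PySem.Set.diff, List.filter_append, List.filter_filter]
  congr 1
  apply List.filter_congr
  intro x hx
  by_cases hv : x ∈ vis <;> by_cases hs : x ∈ s <;>
    simp [PySem.Set.contains, PySem.Set.diff, hv, hs]

-- the fold of pvStepL computes A's expand-then-diff for the whole level
lemma foldl_stepL (adj : PySem.Dict Int (PySem.Set Int)) (d1 : Int)
    (hvnd : ∀ v, (adj.getD v PySem.Set.empty).Nodup) :
    ∀ (cur : List Int) (acc : List (Int × Int)) (vis : PySem.Set Int) (m : Int),
      cur.foldl (pvStepL adj d1) (acc, vis, m) =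
        (acc ++ (PySem.Set.diff (pvExpandA adj cur) vis).map (fun w => (w, d1)),
         vis ++ PySem.Set.diff (pvExpandA adj cur) vis,
         if PySem.Set.diff (pvExpandA adj cur) vis = [] then m else d1) := by
  intro cur
  induction cur using List.reverseRecOn with
  | nil =>
    intro acc vis m
    simp [pvExpandA, PySem.Set.diff, PySem.Set.empty]
  | append_singleton cs v ih =>
    intro acc vis m
    have hexp : pvExpandA adj (cs ++ [v]) =
        PySem.Set.union (pvExpandA adj cs) (adj.getD v PySem.Set.empty) := by
      simp [pvExpandA, List.foldl_append]
    rw [List.foldl_append, ih]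
    simp only [List.foldl_cons, List.foldl_nil, pvStepL, hexp,
      diff_union _ _ _ (hvnd v)]
    refine Prod.ext ?_ (Prod.ext ?_ ?_)
    · simp [List.append_assoc]
    · simp [List.append_assoc]
    · simp only []
      rcases hS : PySem.Set.diff (pvExpandA adj cs) vis with _ | ⟨a, S⟩ <;>
        rcases hN : PySem.Set.diff (adj.getD v PySem.Set.empty)
          (vis ++ PySem.Set.diff (pvExpandA adj cs) vis) with _ | ⟨b, N⟩ <;>
        simp

-- counting: enqueuing `next` consumes that much of the unvisited universe
lemma count_step (U vis next : List Int) (hn : next.Nodup)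
    (h : ∀ x ∈ next, x ∈ U ∧ x ∉ vis) :
    next.length + (U.filter (fun x => !(PySem.Set.contains (vis ++ next) x))).length ≤
      (U.filter (fun x => !(PySem.Set.contains vis x))).length := by
  have hsplit := (List.length_eq_length_filter_add
    (l := U.filter (fun x => !(PySem.Set.contains vis x))) (fun x => decide (x ∈ next))).symm
  have h2 : ((U.filter (fun x => !(PySem.Set.contains vis x))).filter
      (fun a => !decide (a ∈ next))) = U.filter (fun x => !(PySem.Set.contains (vis ++ next) x)) := by
    rw [List.filter_filter]
    apply List.filter_congr
    intro x hx
    by_cases h1 : x ∈ vis <;> by_cases h2 : x ∈ next <;> simp [PySem.Set.contains, h1, h2]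
  have h1 : next.length ≤ ((U.filter (fun x => !(PySem.Set.contains vis x))).filter
      (fun a => decide (a ∈ next))).length := by
    apply List.Subperm.length_le
    apply List.Nodup.subperm hn
    intro x hx
    simp only [List.mem_filter]
    rcases h x hx with ⟨hxU, hxv⟩
    exact ⟨⟨hxU, by simp [PySem.Set.contains, hxv]⟩, by simp [hx]⟩
  rw [h2] at hsplit
  omega

-- main simulation: queue BFS at the start of a level versus A's level loop
lemma simLevels (adj : PySem.Dict Int (PySem.Set Int)) (U : List Int)
    (hval : ∀ v w, w ∈ adj.getD v PySem.Set.empty → w ∈ U)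
    (hvnd : ∀ v, (adj.getD v PySem.Set.empty).Nodup) :
    ∀ (fA fB : Nat) (cur vis : PySem.Set Int) (d m : Int),
      cur.Nodup → vis.Nodup →
      m = (if cur = [] then d - 1 else d) →
      cur.length + (U.filter (fun x => !(PySem.Set.contains vis x))).length ≤ fB →
      (U.filter (fun x => !(PySem.Set.contains vis x))).length + 2 ≤ fA →
      pvGoB adj fB (cur.map (fun v => (v, d))) vis m = pvGoA adj fA cur vis (d - 1) := by
  intro fA
  induction fA with
  | zero => intro fB cur vis d m _ _ _ _ hfA; omega
  | succ f ih =>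
    intro fB cur vis d m hcn hvn hm hfB hfA
    by_cases hc : cur = []
    · subst hc
      simp only [List.map_nil]
      rw [pvGoB_nil, pvGoA]
      simp only [List.isEmpty_nil]
      simpa using hm
    · have hce : cur.isEmpty = false := by simp [hc]
      have hA : pvGoA adj (f+1) cur vis (d-1)
          = pvGoA adj f (PySem.Set.diff (pvExpandA adj cur) vis)
              (PySem.Set.union vis (PySem.Set.diff (pvExpandA adj cur) vis)) (d-1+1) := by
        rw [pvGoA, hce]; simp
      set next := PySem.Set.diff (pvExpandA adj cur) vis with hnext
      have hnnd : next.Nodup := (expand_nodup adj cur).filter _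
      have hdisj : ∀ x ∈ next, x ∉ vis := by
        intro x hx
        have := List.of_mem_filter hx
        simpa [PySem.Set.contains_iff] using this
      have hUmem : ∀ x ∈ next, x ∈ U := by
        intro x hx
        rcases expand_mem adj cur x (List.mem_of_mem_filter hx) with ⟨v, _, hv⟩
        exact hval v x hv
      have hunion : PySem.Set.union vis next = vis ++ next := by
        rw [PySem.Set.union, PySem.Set.update_eq_append_filter,
          PySem.Set.ofList_eq_self_of_nodup _ hnnd]
        congr 1
        apply List.filter_eq_self.2
        intro x hx
        simpa [PySem.Set.contains_iff] using hdisj x hx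
      have hB := pvGoB_level adj d hvnd cur ([], vis, m) fB (by omega)
      rw [foldl_stepL adj (d+1) hvnd cur [] vis m] at hB
      simp only [List.append_nil, List.nil_append, ← hnext] at hB
      have hcnt := count_step U vis next hnnd (fun x hx => ⟨hUmem x hx, hdisj x hx⟩)
      by_cases hne : next = []
      · rw [hB, hne]
        simp only [List.map_nil]
        rw [pvGoB_nil, hA, hne, pvGoA_nil]
        have hmd : m = d := by rw [hm, if_neg hc]
        simp [hmd]
      · rw [hB, if_neg hne]
        have hlen : 1 ≤ next.length := List.length_pos_of_ne_nil hne
        have hvn' : (vis ++ next).Nodup := by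
          rw [List.nodup_append]
          refine ⟨hvn, hnnd, ?_⟩
          intro a ha b hb
          exact fun h => hdisj b hb (h ▸ ha)
        have hrec := ih (fB - cur.length) next (vis ++ next) (d+1) (d+1) hnnd hvn'
          (by rw [if_neg hne]) (by omega) (by omega)
        rw [hrec, hA, hunion]
        have harith : d + 1 - 1 = d - 1 + 1 := by ring
        rw [harith]

-- ===== VERDICT (by name: the statement is the Claim_ definition above) =====
theorem widthSearch_spec : Claim_equal_widthSearch := by
  intro init inputs _
  show widthSearch init inputs = widthSearch_alt init inputs
  simp only [widthSearch, widthSearch_alt, builds_eq]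
  have h1 : PySem.Set.ofList [init] = [init] :=
    PySem.Set.ofList_eq_self_of_nodup _ (List.nodup_singleton init)
  rw [h1]
  have hval : ∀ v w, w ∈ (pvBuildA inputs).getD v PySem.Set.empty →
      w ∈ PySem.Set.ofList (inputs.map (fun p => p.2)) := by
    intro v w h
    exact (PySem.Set.mem_ofList _ _).2 (build_val_mem inputs v w h)
  have hlenU : ((PySem.Set.ofList (inputs.map (fun p => p.2))).filter
      (fun x => !(PySem.Set.contains ([] : PySem.Set Int) x))).length ≤ inputs.length := by
    calc ((PySem.Set.ofList (inputs.map (fun p => p.2))).filter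
        (fun x => !(PySem.Set.contains ([] : PySem.Set Int) x))).length
        ≤ (PySem.Set.ofList (inputs.map (fun p => p.2))).length := List.length_filter_le _ _
      _ ≤ (inputs.map (fun p => p.2)).length := PySem.Set.length_ofList_le _
      _ = inputs.length := by simp
  have hsim := simLevels (pvBuildA inputs) (PySem.Set.ofList (inputs.map (fun p => p.2)))
    hval (fun v => build_val_nodup inputs v)
    (inputs.length + 2) (inputs.length + 2) [init] [] 0 0
    (List.nodup_singleton init) List.nodup_nil (by simp)
    (by simp only [List.length_cons, List.length_nil]; omega) (by omega)
  simp only [List.map_cons, List.map_nil] at hsim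
  norm_num at hsim
  exact hsim.symm
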